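-- pv_equiv track=rewrite | github.com/syedishaaq04/ct-vetting-system | core/nlp_pipeline.py | is_negated
-- ===== SOURCE A (Python) =====
-- def is_negated(text: str, keyword: str, window: int = 5) -> bool:
--     """
--     Checks if a keyword (single or multi-word) in the text
--     is preceded by a negation word within a window of N words.
--     """
--     negation_words = {"no", "not", "without", "denies", "absent", "negative"}
--     text_lower = text.lower()
--     words = text_lower.split()
--
--     # Find the index of the first word of the keyword phrase
--     keyword_words = keyword.lower().split()
--     for i, word in enumerate(words):
--         # Match start of keyword phrase
--         if words[i:i + len(keyword_words)] == keyword_words: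
--             preceding = words[max(0, i - window):i]
--             if any(neg in preceding for neg in negation_words):
--                 return True
--     return False
-- ===== SOURCE B (Python) =====
-- def is_negated(text: str, keyword: str, window: int = 5) -> bool:
--     """Single forward pass: track the index of the most recent negation word
--     instead of re-scanning a window-sized slice at every keyword match."""
--     negation_words = {"no", "not", "without", "denies", "absent", "negative"}
--     words = text.lower().split()
--     keyword_words = keyword.lower().split()
--     k = len(keyword_words)
--     last_neg = None
--     for i, word in enumerate(words):
--         if words[i:i + k] == keyword_words:
--             if last_neg is not None and last_neg >= i - window:
--                 return True
--         if word in negation_words: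
--             last_neg = i
--     return False
-- ===== Notes on version B (the rewrite author's own statement) =====
-- stated objective: alternative
-- what changed: Replaces the per-match re-scan of the preceding window slice (and the membership test of each of the six negation words against it) with a single maintained state variable last_neg, the index of the most recent negation word, checked in O(1) at each phrase match.
import Mathlib
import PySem

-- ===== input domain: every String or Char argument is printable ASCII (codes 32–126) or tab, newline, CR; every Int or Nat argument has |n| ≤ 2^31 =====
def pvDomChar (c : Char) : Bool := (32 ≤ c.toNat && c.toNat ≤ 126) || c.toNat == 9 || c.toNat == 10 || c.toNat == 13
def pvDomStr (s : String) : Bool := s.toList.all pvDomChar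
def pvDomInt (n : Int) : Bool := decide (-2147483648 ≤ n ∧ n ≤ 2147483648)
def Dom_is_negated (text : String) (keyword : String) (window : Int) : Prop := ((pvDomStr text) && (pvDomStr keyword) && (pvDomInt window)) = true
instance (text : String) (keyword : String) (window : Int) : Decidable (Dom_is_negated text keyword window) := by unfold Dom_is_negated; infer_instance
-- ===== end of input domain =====

-- B replaces A's per-match re-scan of the preceding window slice by a maintained
-- last-negation-index checked in O(1) at each match; same return value everywhere.

-- ===== PORT A =====
-- negation_words = {"no", "not", "without", "denies", "absent", "negative"}
def pvNegWords : List String := ["no", "not", "without", "denies", "absent", "negative"]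

-- for i, word in enumerate(words): … (word itself is unused in A's body)
def pvALoop (words kw : List String) (window : Int) : Nat → List String → Bool
  | _, [] => false
  | i, _ :: rest =>
      if PySem.List.slice words (some (i : Int)) (some ((i : Int) + kw.length)) = kw then
        if pvNegWords.any (fun neg =>
            (PySem.List.slice words (some (max 0 ((i : Int) - window))) (some (i : Int))).contains neg) then
          true
        else pvALoop words kw window (i + 1) rest
      else pvALoop words kw window (i + 1) rest

def is_negated (text : String) (keyword : String) (window : Int) : Bool :=
  let words := PySem.Str.split₀ (PySem.Str.lower text)
  let keyword_words := PySem.Str.split₀ (PySem.Str.lower keyword)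
  pvALoop words keyword_words window 0 words

-- ===== PORT B =====
-- last_neg is not None and last_neg >= i - window
def pvLastOk (last : Option Nat) (i : Nat) (window : Int) : Bool :=
  match last with
  | none => false
  | some j => decide ((i : Int) - window ≤ (j : Int))

-- for i, word in enumerate(words): match test first, then update last_neg
def pvBLoop (words kw : List String) (window : Int) : Option Nat → Nat → List String → Bool
  | _, _, [] => false
  | last, i, w :: rest =>
      if PySem.List.slice words (some (i : Int)) (some ((i : Int) + kw.length)) = kw
          ∧ pvLastOk last i window = true then
        true
      else
        pvBLoop words kw window (if w ∈ pvNegWords then some i else last) (i + 1) rest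

def is_negated_alt (text : String) (keyword : String) (window : Int) : Bool :=
  let words := PySem.Str.split₀ (PySem.Str.lower text)
  let keyword_words := PySem.Str.split₀ (PySem.Str.lower keyword)
  pvBLoop words keyword_words window none 0 words

-- ===== PRECONDITION & SPEC =====
def Spec_is_negated (text : String) (keyword : String) (window : Int) (out : Bool) : Prop := out = is_negated_alt text keyword window
instance (text : String) (keyword : String) (window : Int) (out : Bool) : Decidable (Spec_is_negated text keyword window out) := by unfold Spec_is_negated; infer_instance

-- ===== CLAIM (what is proved, stated in full; the proofs are below) =====
def Claim_equal_is_negated : Prop := ∀ (text : String) (keyword : String) (window : Int), Dom_is_negated text keyword window → Spec_is_negated text keyword window (is_negated text keyword window)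

-- ===== LEMMAS AND PROOFS =====

-- Invariant carried by B's loop: `last` is the index of the most recent negation
-- word strictly before position i (none if there is no negation word before i).
def pvInv (words : List String) (i : Nat) (last : Option Nat) : Prop :=
  match last with
  | none => ∀ j : Nat, j < i → ∀ h : j < words.length, words[j] ∉ pvNegWords
  | some m => m < i ∧ (∃ h : m < words.length, words[m] ∈ pvNegWords) ∧
      ∀ j : Nat, m < j → j < i → ∀ h : j < words.length, words[j] ∉ pvNegWords

lemma pv_mem_slice (xs : List String) (a b : Int) (ha : 0 ≤ a) (hb : 0 ≤ b) (x : String) :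
    x ∈ PySem.List.slice xs (some a) (some b) ↔
      ∃ j : Nat, a ≤ (j : Int) ∧ (j : Int) < b ∧ xs[j]? = some x := by
  rw [PySem.List.slice_toNat xs ha hb]
  constructor
  · intro hx
    rcases List.mem_iff_getElem?.1 hx with ⟨k, hk⟩
    rw [List.getElem?_take] at hk
    split at hk
    · rw [List.getElem?_drop] at hk
      refine ⟨a.toNat + k, by omega, by omega, hk⟩
    · exact absurd hk (by simp)
  · rintro ⟨j, hja, hjb, hj⟩
    apply List.mem_iff_getElem?.2
    refine ⟨j - a.toNat, ?_⟩
    rw [List.getElem?_take, if_pos (by omega), List.getElem?_drop]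
    rw [show a.toNat + (j - a.toNat) = j by omega]
    exact hj

-- Under the invariant, A's window re-scan equals B's O(1) test.
lemma pv_cond_eq (words : List String) (window : Int) (i : Nat) (last : Option Nat)
    (hinv : pvInv words i last) :
    (pvNegWords.any (fun neg =>
        (PySem.List.slice words (some (max 0 ((i : Int) - window))) (some (i : Int))).contains neg))
      = pvLastOk last i window := by
  have hiff : (pvNegWords.any (fun neg =>
        (PySem.List.slice words (some (max 0 ((i : Int) - window))) (some (i : Int))).contains neg)) = true ↔
      ∃ j : Nat, (i : Int) - window ≤ (j : Int) ∧ j < i ∧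
        ∃ h : j < words.length, words[j] ∈ pvNegWords := by
    rw [List.any_eq_true]
    constructor
    · rintro ⟨neg, hneg, hc⟩
      rw [List.contains_eq_mem, decide_eq_true_iff,
        pv_mem_slice words _ _ (le_max_left _ _) (Int.natCast_nonneg i)] at hc
      rcases hc with ⟨j, hja, hjb, hj⟩
      rcases List.getElem?_eq_some_iff.1 hj with ⟨hjl, hv⟩
      exact ⟨j, by omega, by omega, hjl, by rw [hv]; exact hneg⟩
    · rintro ⟨j, hja, hjb, hjl, hmem⟩
      refine ⟨words[j], hmem, ?_⟩
      rw [List.contains_eq_mem, decide_eq_true_iff,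
        pv_mem_slice words _ _ (le_max_left _ _) (Int.natCast_nonneg i)]
      exact ⟨j, by omega, by omega, List.getElem?_eq_some_iff.2 ⟨hjl, rfl⟩⟩
  cases hl : last with
  | none =>
    subst hl
    simp only [pvLastOk]
    rw [Bool.eq_false_iff]
    intro h
    rcases hiff.1 h with ⟨j, _, hjb, hjl, hmem⟩
    exact hinv j hjb hjl hmem
  | some m =>
    subst hl
    rcases hinv with ⟨hmi, ⟨hml, hmmem⟩, hmax⟩
    simp only [pvLastOk]
    by_cases hw : (i : Int) - window ≤ (m : Int)
    · rw [decide_eq_true hw]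
      exact hiff.2 ⟨m, hw, hmi, hml, hmmem⟩
    · rw [decide_eq_false hw, Bool.eq_false_iff]
      intro h
      rcases hiff.1 h with ⟨j, hja, hjb, hjl, hmem⟩
      by_cases hjm : j ≤ m
      · exact hw (by omega)
      · exact hmax j (by omega) hjb hjl hmem

lemma pv_inv_step (words : List String) (i : Nat) (last : Option Nat) (w : String)
    (hw : words[i]? = some w) (hinv : pvInv words i last) :
    pvInv words (i + 1) (if w ∈ pvNegWords then some i else last) := by
  rcases List.getElem?_eq_some_iff.1 hw with ⟨hil, hv⟩
  by_cases hmem : w ∈ pvNegWords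
  · rw [if_pos hmem]
    refine ⟨by omega, ⟨hil, by rw [hv]; exact hmem⟩, ?_⟩
    intro j hj1 hj2 _ _; omega
  · rw [if_neg hmem]
    cases hl : last with
    | none =>
      subst hl
      intro j hj hjl
      rcases Nat.lt_succ_iff_lt_or_eq.1 hj with h | h
      · exact hinv j h hjl
      · subst h; rw [hv]; exact hmem
    | some m =>
      subst hl
      rcases hinv with ⟨hmi, hm2, hmax⟩
      refine ⟨by omega, hm2, ?_⟩
      intro j hj1 hj2 hjl
      rcases Nat.lt_succ_iff_lt_or_eq.1 hj2 with h | h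
      · exact hmax j hj1 h hjl
      · subst h; rw [hv]; exact hmem

lemma pvALoop_cons (words kw : List String) (window : Int) (i : Nat) (w : String) (rest : List String) :
    pvALoop words kw window i (w :: rest) =
      if PySem.List.slice words (some (i : Int)) (some ((i : Int) + kw.length)) = kw then
        if pvNegWords.any (fun neg =>
            (PySem.List.slice words (some (max 0 ((i : Int) - window))) (some (i : Int))).contains neg) then
          true
        else pvALoop words kw window (i + 1) rest
      else pvALoop words kw window (i + 1) rest := rfl

lemma pvBLoop_cons (words kw : List String) (window : Int) (last : Option Nat) (i : Nat) (w : String) (rest : List String) :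
    pvBLoop words kw window last i (w :: rest) =
      if PySem.List.slice words (some (i : Int)) (some ((i : Int) + kw.length)) = kw
          ∧ pvLastOk last i window = true then
        true
      else pvBLoop words kw window (if w ∈ pvNegWords then some i else last) (i + 1) rest := rfl

lemma pv_loop_eq (words kw : List String) (window : Int) :
    ∀ (l : List String) (i : Nat) (last : Option Nat),
      words.drop i = l → pvInv words i last →
      pvALoop words kw window i l = pvBLoop words kw window last i l := by
  intro l
  induction l with
  | nil => intro i last _ _; rfl
  | cons w rest ih =>
    intro i last hdrop hinv
    have hw : words[i]? = some w := by
      have h0 : (words.drop i)[0]? = some w := by rw [hdrop]; rfl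
      rw [List.getElem?_drop] at h0
      simpa using h0
    have hrest : words.drop (i + 1) = rest := by
      have ht : (words.drop i).tail = rest := by rw [hdrop]; rfl
      rwa [List.tail_drop] at ht
    rw [pvALoop_cons, pvBLoop_cons, pv_cond_eq words window i last hinv,
      ih (i + 1) _ hrest (pv_inv_step words i last w hw hinv)]
    by_cases h1 : PySem.List.slice words (some (i : Int)) (some ((i : Int) + kw.length)) = kw
    · rw [if_pos h1]
      by_cases h2 : pvLastOk last i window = true
      · rw [if_pos h2, if_pos ⟨h1, h2⟩]
      · have hc2 : ¬ (PySem.List.slice words (some (i : Int)) (some ((i : Int) + kw.length)) = kw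
            ∧ pvLastOk last i window = true) := fun hc => h2 hc.2
        rw [if_neg h2, if_neg hc2]
    · have hc1 : ¬ (PySem.List.slice words (some (i : Int)) (some ((i : Int) + kw.length)) = kw
          ∧ pvLastOk last i window = true) := fun hc => h1 hc.1
      rw [if_neg h1, if_neg hc1]

-- ===== VERDICT (by name: the statement is the Claim_ definition above) =====
theorem is_negated_spec : Claim_equal_is_negated := by
  intro text keyword window _
  unfold Spec_is_negated is_negated is_negated_alt
  exact pv_loop_eq _ _ window _ 0 none rfl (by intro j hj; omega)
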